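-- pv_equiv track=rewrite | github.com/Pyk017/Competetive-Programming | GFG/Arrays/Swap and Maximize/Solution.py | maxSum
-- ===== SOURCE A (Python) =====
-- def maxSum(arr, n):
--     i, j = 0, n - 1
--     arr.sort()
--
--     result = 0
--
--     flag = True
--
--     while i < j:
--         if flag:
--             result += abs(arr[i] - arr[j])
--             i += 1
--         else:
--             result += abs(arr[i] - arr[j])
--             j -= 1
--
--     result += abs(arr[i] - arr[j])
--
--     return result
-- ===== SOURCE B (Python) =====
-- def maxSum(arr, n):
--     # sum over the n smallest values of (largest-of-them - value), as one closed form
--     b = sorted(arr)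
--     return n * b[n - 1] - sum(b[:n])
-- ===== Notes on version B (the rewrite author's own statement) =====
-- stated objective: simpler
-- what changed: B replaces A's index-walking while-loop that accumulates |arr[i]-arr[n-1]| term by term with the closed form n*b[n-1] - sum(b[:n]) on the sorted array (and B does not mutate arr, while A sorts it in place); Pre_ restricts to the natural domain 1 <= n <= len(arr) (in the source problem n is the array's length): for n < 1 the task is unspecified and neither program's value is the one to match.
-- outside the precondition, e.g. on maxSum([3, 1], 0): A returns 2, B returns 0; on maxSum([3, 1, 4], -1): A returns 2, B returns -7
import Mathlib
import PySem

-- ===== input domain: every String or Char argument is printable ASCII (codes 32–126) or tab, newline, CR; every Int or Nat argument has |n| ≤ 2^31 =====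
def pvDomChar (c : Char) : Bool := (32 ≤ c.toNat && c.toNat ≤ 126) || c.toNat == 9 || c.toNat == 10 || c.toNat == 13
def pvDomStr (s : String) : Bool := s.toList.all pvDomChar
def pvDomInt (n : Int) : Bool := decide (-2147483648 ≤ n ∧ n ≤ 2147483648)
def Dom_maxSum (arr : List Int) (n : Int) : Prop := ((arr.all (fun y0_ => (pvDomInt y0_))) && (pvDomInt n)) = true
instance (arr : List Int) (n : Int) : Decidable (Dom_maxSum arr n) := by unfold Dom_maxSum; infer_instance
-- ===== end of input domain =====

-- B replaces A's index-walking accumulation loop by the closed form n*b[n-1] - sum(b[:n]) on the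
-- sorted array (equal return values on Pre_; side effects differ: A sorts arr in place, B does not).


-- ===== PORT A =====
-- the while loop: state (i, j, result); flag is initialised True and never toggled
def maxSumLoop (a : List Int) (i j result : Int) (flag : Bool) : Int × Int × Int :=
  if i < j then
    if flag then
      maxSumLoop a (i + 1) j (result + |PySem.List.pyGetD a i 0 - PySem.List.pyGetD a j 0|) flag
    else
      maxSumLoop a i (j - 1) (result + |PySem.List.pyGetD a i 0 - PySem.List.pyGetD a j 0|) flag
  else (i, j, result)
termination_by (j - i).toNat
decreasing_by all_goals (simp_wf; omega)

def maxSum (arr : List Int) (n : Int) : Int :=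
  let a := PySem.List.sorted arr (fun x => x) false
  let s := maxSumLoop a 0 (n - 1) 0 true
  s.2.2 + |PySem.List.pyGetD a s.1 0 - PySem.List.pyGetD a s.2.1 0|

-- ===== PORT B =====
def maxSum_alt (arr : List Int) (n : Int) : Int :=
  let b := PySem.List.sorted arr (fun x => x) false
  n * PySem.List.pyGetD b (n - 1) 0 - (PySem.List.slice b none (some n)).sum

-- ===== PRECONDITION & SPEC =====
-- A raises IndexError on the empty list and whenever n > len(arr) or n < 1 - len(arr); in addition
-- Pre_ restricts to the function's natural domain 1 <= n <= len(arr) (in the source problem n is the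
-- array's length): for n < 1 the task is unspecified and neither program's value is the one to match.
def Pre_maxSum (arr : List Int) (n : Int) : Prop :=
  arr ≠ [] ∧ 1 ≤ n ∧ n ≤ (arr.length : Int)
instance (arr : List Int) (n : Int) : Decidable (Pre_maxSum arr n) := by unfold Pre_maxSum; infer_instance
def pvWitness_maxSum : List Int × Int := ([3, 1, 4, 1, 5], 5)

def Spec_maxSum (arr : List Int) (n : Int) (out : Int) : Prop := out = maxSum_alt arr n
instance (arr : List Int) (n : Int) (out : Int) : Decidable (Spec_maxSum arr n out) := by unfold Spec_maxSum; infer_instance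

-- ===== CLAIM (what is proved, stated in full; the proofs are below) =====
def Claim_equal_maxSum : Prop := ∀ (arr : List Int) (n : Int), Dom_maxSum arr n → Pre_maxSum arr n → Spec_maxSum arr n (maxSum arr n)

-- ===== LEMMAS AND PROOFS =====

-- peel the first index off a range-indexed sum
theorem sum_range_shift (a : List Int) (c : Int) (d : Nat) (i : Int) :
    ((List.range (d + 1)).map (fun k : Nat => |PySem.List.pyGetD a (i + (k : Int)) 0 - c|)).sum
      = |PySem.List.pyGetD a i 0 - c|
        + ((List.range d).map (fun k : Nat => |PySem.List.pyGetD a (i + 1 + (k : Int)) 0 - c|)).sum := by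
  rw [List.range_succ_eq_map, List.map_cons, List.sum_cons, List.map_map]
  congr 1
  · norm_num
  · refine congrArg List.sum (List.map_congr_left ?_)
    intro k _
    simp only [Function.comp_apply]
    have h : i + ((Nat.succ k : Nat) : Int) = i + 1 + (k : Int) := by push_cast; ring
    rw [h]

-- A's loop with flag=True walks i up to j, summing |a[i]-a[j]|
theorem maxSumLoop_spec (a : List Int) : ∀ (d : Nat) (i r : Int),
    maxSumLoop a i (i + d) r true
      = (i + d, i + d,
         r + ((List.range d).map
              (fun k : Nat => |PySem.List.pyGetD a (i + (k : Int)) 0 - PySem.List.pyGetD a (i + (d : Int)) 0|)).sum) := by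
  intro d
  induction d with
  | zero => intro i r; rw [maxSumLoop]; simp
  | succ d ih =>
    intro i r
    rw [maxSumLoop]
    have hlt : i < i + ((d + 1 : Nat) : Int) := by omega
    rw [if_pos hlt, if_pos rfl]
    have h1 : i + 1 + (d : Int) = i + ((d + 1 : Nat) : Int) := by push_cast; ring
    have hih := ih (i + 1)
      (r + |PySem.List.pyGetD a i 0 - PySem.List.pyGetD a (i + ((d + 1 : Nat) : Int)) 0|)
    rw [h1] at hih
    rw [hih, sum_range_shift]
    simp only [Prod.mk.injEq, true_and]
    ring

-- in a ≤-sorted list, elements are monotone in the index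
theorem sorted_getElem_le (l : List Int) (hp : l.Pairwise (· ≤ ·)) (p q : Nat)
    (hpq : p ≤ q) (hq : q < l.length) : l[p]'(by omega) ≤ l[q] := by
  rcases Nat.lt_or_ge p q with h | h
  · exact List.pairwise_iff_getElem.mp hp p q (by omega) hq h
  · have hpe : p = q := by omega
    subst hpe
    exact le_refl _

-- the first d entries read through getD are the take
theorem map_getD_range (l : List Int) : ∀ d, d ≤ l.length →
    (List.range d).map (fun k => l.getD k 0) = l.take d := by
  intro d
  induction d with
  | zero => simp
  | succ d ih =>
    intro hd
    rw [List.range_succ, List.map_append, ih (by omega), List.map_cons, List.map_nil,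
      List.getD_eq_getElem l 0 (by omega), List.take_add_one,
      List.getElem?_eq_getElem (by omega : d < l.length)]
    rfl

-- sum of a take, one element at a time
theorem sum_take_succ (l : List Int) (d : Nat) (hd : d < l.length) :
    (l.take (d + 1)).sum = (l.take d).sum + l[d] := by
  rw [List.take_add_one, List.getElem?_eq_getElem hd, List.sum_append]
  simp

-- sum of (M - g k) over a range
theorem sum_sub_range (L : Nat) (M : Int) (g : Nat → Int) :
    ((List.range L).map (fun k => M - g k)).sum = L * M - ((List.range L).map g).sum := by
  have h : (fun k : Nat => M - g k) = (fun k : Nat => M + (- g k)) := by funext k; ring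
  rw [h, PySem.List.sum_map_add_int, PySem.List.sum_map_const_int]
  have hneg : (List.range L).map (fun k => - g k) = ((List.range L).map g).map (fun x => -x) := by
    rw [List.map_map]; rfl
  rw [hneg, ← List.sum_neg]
  simp only [List.length_range]
  ring

theorem maxSum_spec_aux (arr : List Int) (n : Int) (h : arr ≠ [])
    (hlo : 1 ≤ n) (hhi : n ≤ (arr.length : Int)) :
    maxSum arr n = maxSum_alt arr n := by
  set a := PySem.List.sorted arr (fun x => x) false with ha
  have hperm : a.Perm arr := PySem.List.sorted_perm arr (fun x => x) false
  have hlen : a.length = arr.length := hperm.length_eq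
  have hpw : a.Pairwise (· ≤ ·) := by
    simpa using PySem.List.sorted_pairwise arr (fun x => x)
  set L := arr.length with hL
  have hL1 : 1 ≤ L := List.length_pos_of_ne_nil h
  set N := n.toNat with hN
  have hNn : n = (N : Int) := by omega
  have hN1 : 1 ≤ N := by omega
  have hNL : N ≤ L := by omega
  have hd : (0 : Int) + ((N - 1 : Nat) : Int) = n - 1 := by omega
  have hloop := maxSumLoop_spec a (N - 1) 0 0
  rw [hd] at hloop
  have hNlt : N - 1 < a.length := by rw [hlen]; omega
  have hgj : PySem.List.pyGetD a (n - 1) 0 = a[N - 1]'hNlt := by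
    rw [PySem.List.pyGetD_eq_getElem a 0 (by omega) (by rw [hlen]; omega)]
    congr 1
    omega
  have hsum_eq : ((List.range (N - 1)).map
      (fun k : Nat => |PySem.List.pyGetD a ((k : Int)) 0 - PySem.List.pyGetD a (n - 1) 0|)).sum
      = ((N - 1 : Nat) : Int) * a[N - 1]'hNlt - (a.take (N - 1)).sum := by
    have hcong : ∀ k ∈ List.range (N - 1),
        |PySem.List.pyGetD a ((k : Int)) 0 - PySem.List.pyGetD a (n - 1) 0|
          = a[N - 1]'hNlt - a.getD k 0 := by
      intro k hk
      rw [List.mem_range] at hk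
      have hkl : k < a.length := by rw [hlen]; omega
      rw [hgj, PySem.List.pyGetD_eq_getElem a 0 (by omega) (by rw [hlen]; omega)]
      have hidx : ((k : Int)).toNat = k := by omega
      simp only [hidx]
      have hle : a[k]'hkl ≤ a[N - 1]'hNlt := sorted_getElem_le a hpw k (N - 1) (by omega) hNlt
      rw [abs_of_nonpos (by omega), List.getD_eq_getElem a 0 hkl]
      ring
    rw [List.map_congr_left hcong, sum_sub_range (N - 1) (a[N - 1]'hNlt) (fun k => a.getD k 0),
      map_getD_range a (N - 1) (by omega)]
  have htake := sum_take_succ a (N - 1) hNlt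
  rw [show N - 1 + 1 = N from by omega] at htake
  show (let s := maxSumLoop a 0 (n - 1) 0 true;
        s.2.2 + |PySem.List.pyGetD a s.1 0 - PySem.List.pyGetD a s.2.1 0|) = _
  rw [hloop]
  simp only [sub_self, abs_zero, add_zero, zero_add]
  have hrhs : maxSum_alt arr n = n * a[N - 1]'hNlt - (a.take N).sum := by
    unfold maxSum_alt
    rw [← ha]
    show n * PySem.List.pyGetD a (n - 1) 0 - (PySem.List.slice a none (some n)).sum = _
    rw [hgj, hNn, PySem.List.slice_to_natCast a N]
  rw [hsum_eq, hrhs, htake]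
  have hc : ((N - 1 : Nat) : Int) = (N : Int) - 1 := by omega
  rw [hc, hNn]
  ring

-- ===== VERDICT (by name: the statement is the Claim_ definition above) =====
theorem maxSum_spec : Claim_equal_maxSum := by
  intro arr n _ hpre
  obtain ⟨hne, hlo, hhi⟩ := hpre
  exact maxSum_spec_aux arr n hne hlo hhi
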